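-- pv_equiv track=rewrite | github.com/CLIMADA-project/climada_python | climada/engine/option_appraisal/core.py | _get_unique_measure_periods
-- ===== SOURCE A (Python) =====
-- def _get_unique_measure_periods(
--     year_to_measures: dict[int, list[str]]
-- ) -> list[tuple[list[str], int, int]]:
--     """Extract unique measure lists with their corresponding min and max year.
--
--     Parameters
--     ----------
--     year_to_measures : dict[int, list[str]]
--         Dictionary where keys are years and values are lists of active measures.
--
--     Returns
--     -------
--     list[tuple[list[str], int, int]]
--         A list of tuples containing (unique measure list, min year, max year).
--     """
--     sorted_years = sorted(year_to_measures.keys())  # Ensure chronological order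
--     unique_periods = []
--
--     current_measures = None
--     start_year = None
--
--     for year in sorted_years:
--         measures = sorted(
--             year_to_measures[year]
--         )  # Sorting ensures consistency in comparison
--
--         if measures != current_measures:  # New unique set detected
--             if current_measures is not None:  # Save the previous period
--                 unique_periods.append((current_measures, start_year, year - 1))
--
--             # Start a new period
--             current_measures = measures
--             start_year = year
--
--     # Add the last recorded period
--     if current_measures is not None:
--         unique_periods.append((current_measures, start_year, sorted_years[-1]))
--
--     return unique_periods
-- ===== SOURCE B (Python) =====
-- def _get_unique_measure_periods(
--     year_to_measures: dict[int, list[str]]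
-- ) -> list[tuple[list[str], int, int]]:
--     """Change-point formulation: pair each year's sorted measures with the
--     previous year's via zip, keep the change points, then attach end years
--     pairwise (next start - 1, global max year for the last period)."""
--     years = sorted(year_to_measures)
--     if not years:
--         return []
--     ms = [sorted(year_to_measures[y]) for y in years]
--     starts = [(m, y) for prev, m, y in zip([None] + ms, ms, years) if m != prev]
--     ends = [s - 1 for _, s in starts[1:]] + [years[-1]]
--     return [(m, s, e) for (m, s), e in zip(starts, ends)]
-- ===== Notes on version B (the rewrite author's own statement) =====
-- stated objective: alternative
-- what changed: Replaces A's stateful accumulator scan (current_measures/start_year mutated across the loop) by a stateless change-point formulation: zip each year's sorted measures with the previous year's to keep the change points, then attach end years pairwise (next start - 1, global max year for the last period).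
import Mathlib
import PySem

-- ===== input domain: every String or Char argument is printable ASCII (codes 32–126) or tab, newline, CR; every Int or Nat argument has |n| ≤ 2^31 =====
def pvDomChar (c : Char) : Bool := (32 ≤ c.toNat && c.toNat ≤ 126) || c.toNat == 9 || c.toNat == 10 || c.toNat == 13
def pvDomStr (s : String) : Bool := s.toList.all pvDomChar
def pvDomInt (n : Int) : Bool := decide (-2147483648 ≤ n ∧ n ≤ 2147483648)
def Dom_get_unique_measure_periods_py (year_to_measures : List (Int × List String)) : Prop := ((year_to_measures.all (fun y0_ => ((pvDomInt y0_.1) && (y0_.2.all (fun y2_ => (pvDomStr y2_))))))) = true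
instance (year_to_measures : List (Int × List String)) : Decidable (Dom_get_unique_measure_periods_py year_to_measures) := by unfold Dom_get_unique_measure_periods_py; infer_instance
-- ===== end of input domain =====

-- B replaces A's stateful accumulator scan by a stateless change-point formulation
-- (zip with the previous year's measures, then attach end years pairwise); objective: alternative.

-- ===== PORT A =====
-- the body of A's for-loop (state = (unique_periods, current_measures, start_year))
def pvStepA (d : PySem.Dict Int (List String))
    (acc : List (List String × Int × Int) × Option (List String) × Option Int) (year : Int) :
    List (List String × Int × Int) × Option (List String) × Option Int :=
  let measures := PySem.List.sorted (d.getD year []) (fun m => m) false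
  if acc.2.1 ≠ some measures then
    (match acc.2.1, acc.2.2 with
      | some c, some s => acc.1 ++ [(c, s, year - 1)]
      | _, _ => acc.1,
     some measures, some year)
  else acc

-- A's epilogue: 'if current_measures is not None: append (current, start, last)'
def pvFinalA (st : List (List String × Int × Int) × Option (List String) × Option Int)
    (last : Int) : List (List String × Int × Int) :=
  match st.2.1, st.2.2 with
  | some c, some s => st.1 ++ [(c, s, last)]
  | _, _ => st.1

def get_unique_measure_periods_py (year_to_measures : List (Int × List String)) :
    List (List String × Int × Int) :=
  let d := PySem.Dict.ofList year_to_measures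
  let sorted_years := PySem.List.sorted d.keys (fun y => y) false
  pvFinalA (sorted_years.foldl (pvStepA d) ([], none, none))
    ((PySem.List.pyGet? sorted_years (-1)).getD 0)   -- sorted_years[-1]; only used when the loop ran, so the list is nonempty

-- ===== PORT B =====
def get_unique_measure_periods_py_alt (year_to_measures : List (Int × List String)) :
    List (List String × Int × Int) :=
  let d := PySem.Dict.ofList year_to_measures
  let years := PySem.List.sorted d.keys (fun y => y) false
  if years.isEmpty then [] else
  let ms := years.map (fun y => PySem.List.sorted (d.getD y []) (fun m => m) false)
  let starts := ((none :: ms.map some).zip (ms.zip years)).filterMap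
    (fun p => if some p.2.1 ≠ p.1 then some (p.2.1, p.2.2) else none)
  let ends := (starts.drop 1).map (fun p => p.2 - 1) ++ [(PySem.List.pyGet? years (-1)).getD 0]
  (starts.zip ends).map (fun p => (p.1.1, p.1.2, p.2))

-- ===== PRECONDITION & SPEC =====
def Spec_get_unique_measure_periods_py (year_to_measures : List (Int × List String)) (out : List (List String × Int × Int)) : Prop := out = get_unique_measure_periods_py_alt year_to_measures
instance (year_to_measures : List (Int × List String)) (out : List (List String × Int × Int)) : Decidable (Spec_get_unique_measure_periods_py year_to_measures out) := by unfold Spec_get_unique_measure_periods_py; infer_instance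

-- ===== CLAIM (what is proved, stated in full; the proofs are below) =====
def Claim_equal_get_unique_measure_periods_py : Prop := ∀ (year_to_measures : List (Int × List String)), Dom_get_unique_measure_periods_py year_to_measures → Spec_get_unique_measure_periods_py year_to_measures (get_unique_measure_periods_py year_to_measures)

-- ===== LEMMAS AND PROOFS =====

-- sorted measures of a year
def pvMeas (d : PySem.Dict Int (List String)) (y : Int) : List String :=
  PySem.List.sorted (d.getD y []) (fun m => m) false

-- change points (measures, start year) produced from current block (m, s) and remaining years
def pvChunks (d : PySem.Dict Int (List String)) (m : List String) (s : Int) :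
    List Int → List (List String × Int)
  | [] => [(m, s)]
  | y :: t => if pvMeas d y = m then pvChunks d m s t else (m, s) :: pvChunks d (pvMeas d y) y t

-- change points strictly after a year with measures m
def pvH (d : PySem.Dict Int (List String)) (m : List String) :
    List Int → List (List String × Int)
  | [] => []
  | y :: t => (if pvMeas d y ≠ m then [(pvMeas d y, y)] else []) ++ pvH d (pvMeas d y) t

-- attach end years: next start - 1, the given last year for the final entry
def pvEnds : List (List String × Int) → Int → List (List String × Int × Int)
  | [], _ => []
  | [p], last => [(p.1, p.2, last)]
  | p :: q :: t, last => (p.1, p.2, q.2 - 1) :: pvEnds (q :: t) last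

theorem pvChunks_eq (d : PySem.Dict Int (List String)) (m : List String) (s : Int)
    (ys : List Int) : pvChunks d m s ys = (m, s) :: pvH d m ys := by
  induction ys generalizing m s with
  | nil => rfl
  | cons y t ih =>
    by_cases h : pvMeas d y = m
    · simp [pvChunks, pvH, h, ih]
    · simp [pvChunks, pvH, h, ih]

theorem pvFoldA (d : PySem.Dict Int (List String)) (last : Int) (ys : List Int)
    (ups : List (List String × Int × Int)) (m : List String) (s : Int) :
    pvFinalA (ys.foldl (pvStepA d) (ups, some m, some s)) last
      = ups ++ pvEnds (pvChunks d m s ys) last := by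
  induction ys generalizing ups m s with
  | nil => rfl
  | cons y t ih =>
    by_cases h : pvMeas d y = m
    · have h' : PySem.List.sorted (d.getD y []) (fun m => m) false = m := h
      have hstep : pvStepA d (ups, some m, some s) y = (ups, some m, some s) := by
        simp [pvStepA, h']
      simp only [List.foldl_cons, hstep, ih, pvChunks, if_pos h]
    · have h' : ¬ PySem.List.sorted (d.getD y []) (fun m => m) false = m := h
      have hstep : pvStepA d (ups, some m, some s) y
          = (ups ++ [(m, s, y - 1)], some (pvMeas d y), some y) := by
        simp [pvStepA, pvMeas]
        exact fun hc => h' hc.symm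
      simp only [List.foldl_cons, hstep, ih]
      rw [pvChunks, if_neg h, pvChunks_eq]
      simp [pvEnds]

theorem pvZipB (d : PySem.Dict Int (List String)) (t : List Int) (m : List String) :
    ((some m :: ((t.map (pvMeas d)).map some)).zip ((t.map (pvMeas d)).zip t)).filterMap
        (fun p => if some p.2.1 ≠ p.1 then some (p.2.1, p.2.2) else none)
      = pvH d m t := by
  induction t generalizing m with
  | nil => rfl
  | cons z u ih =>
    have key := ih (pvMeas d z)
    by_cases h : pvMeas d z = m
    · simp only [List.map_cons, List.zip_cons_cons, List.filterMap_cons, pvH]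
      simp [h] at key ⊢
      exact key
    · simp only [List.map_cons, List.zip_cons_cons, List.filterMap_cons, pvH]
      simp [h] at key ⊢
      exact key

theorem pvZipB_full (d : PySem.Dict Int (List String)) (y : Int) (t : List Int) :
    ((none :: (((y :: t).map (pvMeas d)).map some)).zip
        (((y :: t).map (pvMeas d)).zip (y :: t))).filterMap
        (fun p => if some p.2.1 ≠ p.1 then some (p.2.1, p.2.2) else none)
      = pvChunks d (pvMeas d y) y t := by
  rw [pvChunks_eq]
  simp only [List.map_cons, List.zip_cons_cons, List.filterMap_cons]
  rw [← pvZipB d t (pvMeas d y)]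
  simp

theorem pvAssemble (cps : List (List String × Int)) (last : Int) :
    (cps.zip ((cps.drop 1).map (fun p => p.2 - 1) ++ [last])).map
        (fun p => (p.1.1, p.1.2, p.2))
      = pvEnds cps last := by
  induction cps with
  | nil => rfl
  | cons p rest ih =>
    cases rest with
    | nil => rfl
    | cons q t =>
      simp only [List.drop_succ_cons, List.drop_zero, List.map_cons, List.cons_append,
        List.zip_cons_cons, pvEnds]
      rw [← ih]
      simp

-- ===== VERDICT (by name: the statement is the Claim_ definition above) =====
theorem get_unique_measure_periods_py_spec : Claim_equal_get_unique_measure_periods_py := by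
  intro ytm _
  unfold Spec_get_unique_measure_periods_py
  simp only [get_unique_measure_periods_py, get_unique_measure_periods_py_alt]
  rw [show (fun y => PySem.List.sorted ((PySem.Dict.ofList ytm).getD y []) (fun m => m) false)
        = pvMeas (PySem.Dict.ofList ytm) from rfl]
  set d := PySem.Dict.ofList ytm with hd
  cases hys : PySem.List.sorted d.keys (fun y => y) false with
  | nil => simp [pvFinalA]
  | cons y t =>
    have hstep0 : pvStepA d ([], none, none) y
        = ([], some (pvMeas d y), some y) := by
      simp [pvStepA, pvMeas]
    simp only [List.foldl_cons, hstep0, List.isEmpty_cons, Bool.false_eq_true, if_false]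
    rw [pvFoldA, pvZipB_full, pvAssemble]
    simp
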